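-- pv_equiv track=rewrite | github.com/Sumedha494/DSA-Questions | find_all_subsquares_of_size_K.py | sumOfSubsquares
-- ===== SOURCE A (Python) =====
-- def sumOfSubsquares(matrix, k):
--     """
--     Find sum of each K x K subsquare
--     """
--     if not matrix or not matrix[0]:
--         return []
--
--     rows = len(matrix)
--     cols = len(matrix[0])
--
--     if k > rows or k > cols:
--         return []
--
--     sums = []
--
--     for i in range(rows - k + 1):
--         row_sums = []
--         for j in range(cols - k + 1):
--             total = 0
--             for r in range(i, i + k):
--                 for c in range(j, j + k):
--                     total += matrix[r][c]
--             row_sums.append(total)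
--         sums.append(row_sums)
--
--     return sums
-- ===== SOURCE B (Python) =====
-- def sumOfSubsquares(matrix, k):
--     """
--     Find sum of each K x K subsquare via a 2D prefix-sum (integral image):
--     each window is 4 table lookups instead of a k*k rescan.
--     """
--     if not matrix or not matrix[0]:
--         return []
--
--     rows = len(matrix)
--     cols = len(matrix[0])
--
--     if k > rows or k > cols:
--         return []
--
--     # P[i][j] = sum of matrix[r][c] for r < i, c < j
--     P = [[0] * (cols + 1)]
--     for r in range(rows):
--         prev = P[r]
--         cur = [0]
--         s = 0
--         for c in range(cols):
--             s += matrix[r][c]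
--             cur.append(prev[c + 1] + s)
--         P.append(cur)
--
--     return [[P[i + k][j + k] - P[i][j + k] - P[i + k][j] + P[i][j]
--              for j in range(cols - k + 1)]
--             for i in range(rows - k + 1)]
-- ===== Notes on version B (the rewrite author's own statement) =====
-- stated objective: alternative
-- what changed: B builds a 2D prefix-sum table (integral image) once and reads each KxK window off it with four lookups and three additions, instead of A's re-summing of all k*k cells per window; a timing run's generated inputs use small k, where no speedup is measured.
-- outside the precondition, e.g. on sumOfSubsquares([[1]], -1): A returns [[0, 0, 0], [0, 0, 0], [0, 0, 0]], B raises IndexError; on sumOfSubsquares([[1, 2], [3]], 0): A returns [[0, 0, 0], [0, 0, 0], [0, 0, 0]], B raises IndexError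
import Mathlib
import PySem

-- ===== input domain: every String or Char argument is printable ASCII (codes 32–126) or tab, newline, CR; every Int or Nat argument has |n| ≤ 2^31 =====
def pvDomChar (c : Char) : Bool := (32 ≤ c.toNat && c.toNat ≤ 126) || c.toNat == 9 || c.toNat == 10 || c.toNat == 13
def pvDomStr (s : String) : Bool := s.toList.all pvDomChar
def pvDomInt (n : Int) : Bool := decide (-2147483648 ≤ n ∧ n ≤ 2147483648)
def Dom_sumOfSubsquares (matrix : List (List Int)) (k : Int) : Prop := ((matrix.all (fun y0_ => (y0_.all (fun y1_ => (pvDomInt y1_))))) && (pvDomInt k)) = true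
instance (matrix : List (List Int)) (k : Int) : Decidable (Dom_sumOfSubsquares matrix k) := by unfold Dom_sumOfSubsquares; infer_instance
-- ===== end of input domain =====

-- B builds a 2D prefix-sum table (integral image) once and reads each window off it with
-- four lookups, instead of A's cell-by-cell rescan of every k×k window.

-- ===== PORT A =====
def sumOfSubsquares (matrix : List (List Int)) (k : Int) : List (List Int) :=
  if matrix = [] ∨ matrix.headD [] = [] then []
  else
    let rows : Int := PySem.List.len matrix
    let cols : Int := PySem.List.len (matrix.headD [])
    if k > rows ∨ k > cols then []
    else
      (PySem.List.pyRange 0 (rows - k + 1) 1).foldl (fun sums i =>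
        sums ++ [(PySem.List.pyRange 0 (cols - k + 1) 1).foldl (fun row_sums j =>
          row_sums ++ [(PySem.List.pyRange i (i + k) 1).foldl (fun total r =>
            (PySem.List.pyRange j (j + k) 1).foldl (fun total c =>
              total + PySem.List.pyGetD (PySem.List.pyGetD matrix r []) c 0) total) 0]) []]) []

-- ===== PORT B =====
def sumOfSubsquares_alt (matrix : List (List Int)) (k : Int) : List (List Int) :=
  if matrix = [] ∨ matrix.headD [] = [] then []
  else
    let rows : Int := PySem.List.len matrix
    let cols : Int := PySem.List.len (matrix.headD [])
    if k > rows ∨ k > cols then []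
    else
      -- P[i][j] = sum of matrix[r][c] for r < i, c < j (the integral image)
      let P := (PySem.List.pyRange 0 rows 1).foldl (fun P r =>
        let prev := PySem.List.pyGetD P r []
        P ++ [((PySem.List.pyRange 0 cols 1).foldl (fun (st : List Int × Int) c =>
            let s := st.2 + PySem.List.pyGetD (PySem.List.pyGetD matrix r []) c 0
            (st.1 ++ [PySem.List.pyGetD prev (c + 1) 0 + s], s)) ([0], 0)).1])
        [PySem.List.pyRepeat [0] (cols + 1)]
      (PySem.List.pyRange 0 (rows - k + 1) 1).map (fun i =>
        (PySem.List.pyRange 0 (cols - k + 1) 1).map (fun j =>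
          PySem.List.pyGetD (PySem.List.pyGetD P (i + k) []) (j + k) 0
          - PySem.List.pyGetD (PySem.List.pyGetD P i []) (j + k) 0
          - PySem.List.pyGetD (PySem.List.pyGetD P (i + k) []) j 0
          + PySem.List.pyGetD (PySem.List.pyGetD P i []) j 0))

-- ===== PRECONDITION & SPEC =====
-- Pre_ excludes (a) k < 0 on a nonempty matrix, where A's all-zero (rows-k+1)×(cols-k+1) grid is an
-- accident of empty loops and B's negative table indices raise IndexError (or wrap), and (b) matrices
-- with a row shorter than the first row when 0 ≤ k ≤ min(rows, cols): A raises IndexError there for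
-- k ≥ 1, and B's prefix table reads the full first-row width, so B raises already for k = 0.
def Pre_sumOfSubsquares (matrix : List (List Int)) (k : Int) : Prop :=
  (0 ≤ k ∨ matrix = [] ∨ matrix.headD [] = []) ∧
  ((0 ≤ k ∧ k ≤ (matrix.length : Int) ∧ k ≤ ((matrix.headD []).length : Int)) →
    ∀ row ∈ matrix, (matrix.headD []).length ≤ row.length)
instance (matrix : List (List Int)) (k : Int) : Decidable (Pre_sumOfSubsquares matrix k) := by
  unfold Pre_sumOfSubsquares; infer_instance
def pvWitness_sumOfSubsquares : List (List Int) × Int := ([[1, 2], [3, 4]], 2)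

def Spec_sumOfSubsquares (matrix : List (List Int)) (k : Int) (out : List (List Int)) : Prop := out = sumOfSubsquares_alt matrix k
instance (matrix : List (List Int)) (k : Int) (out : List (List Int)) : Decidable (Spec_sumOfSubsquares matrix k out) := by unfold Spec_sumOfSubsquares; infer_instance

-- ===== CLAIM (what is proved, stated in full; the proofs are below) =====
def Claim_equal_sumOfSubsquares : Prop := ∀ (matrix : List (List Int)) (k : Int), Dom_sumOfSubsquares matrix k → Pre_sumOfSubsquares matrix k → Spec_sumOfSubsquares matrix k (sumOfSubsquares matrix k)

-- ===== LEMMAS AND PROOFS =====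

-- pvS matrix i j = sum of the first j entries of each of the first i rows
def pvS (matrix : List (List Int)) (i j : Nat) : Int :=
  ((List.range i).map (fun r => ((matrix.getD r []).take j).sum)).sum

theorem pvS_succ (matrix : List (List Int)) (i j : Nat) :
    pvS matrix (i + 1) j = pvS matrix i j + ((matrix.getD i []).take j).sum := by
  simp [pvS, List.range_succ]

-- telescoping segment sum
theorem seg_sum (l : List Int) (j n : Nat) (h : j + n ≤ l.length) :
    ((List.range n).map (fun c => l.getD (j + c) 0)).sum
      = (l.take (j + n)).sum - (l.take j).sum := by
  induction n with
  | zero => simp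
  | succ n ih =>
    rw [List.range_succ, List.map_append, List.sum_append]
    have hlt : j + n < l.length := by omega
    have h1 : (l.take (j + (n + 1))).sum = (l.take (j + n)).sum + l[j + n] :=
      List.sum_take_succ l (j + n) hlt
    have h2 : l.getD (j + n) 0 = l[j + n] := List.getD_eq_getElem l 0 hlt
    rw [ih (by omega), h1]
    simp only [List.map_cons, List.map_nil, List.sum_cons, List.sum_nil, h2]
    ring

-- the inner prefix-row fold of B, in closed form
theorem fold_cur (g h : Nat → Int) (n : Nat) (p : List Int) (a : Int) :
    (List.range n).foldl
        (fun (st : List Int × Int) c => (st.1 ++ [h c + (st.2 + g c)], st.2 + g c)) (p, a)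
      = (p ++ (List.range n).map (fun t => h t + (a + ((List.range (t + 1)).map g).sum)),
         a + ((List.range n).map g).sum) := by
  induction n with
  | zero => simp
  | succ n ih =>
    rw [List.range_succ, List.foldl_append, List.map_append, List.map_append, ih]
    simp [List.range_succ, List.append_assoc, add_assoc]

-- B's table-building fold, characterised: row i of P tabulates pvS matrix i
theorem buildP (matrix : List (List Int)) (W : Nat)
    (hw : ∀ row ∈ matrix, W ≤ row.length) (m : Nat) (hm : m ≤ matrix.length) :
    (List.range m).foldl
        (fun P r => P ++ [((List.range W).foldl (fun (st : List Int × Int) c =>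
            (st.1 ++ [(P.getD r []).getD (c + 1) 0 + (st.2 + (matrix.getD r []).getD c 0)],
             st.2 + (matrix.getD r []).getD c 0)) ([0], 0)).1])
        [List.replicate (W + 1) 0]
      = (List.range (m + 1)).map (fun i => (List.range (W + 1)).map (fun j => pvS matrix i j)) := by
  induction m with
  | zero =>
    simp [pvS, List.map_const']
  | succ m ih =>
    rw [List.range_succ, List.foldl_append, ih (by omega)]
    simp only [List.foldl_cons, List.foldl_nil]
    rw [PySem.List.getD_map_range _ _ _ _ (by omega), fold_cur,
        List.range_succ (n := m + 1), List.map_append]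
    have hmem : matrix.getD m [] ∈ matrix := by
      rw [List.getD_eq_getElem matrix [] (by omega)]; exact List.getElem_mem _
    have hrow : W ≤ (matrix.getD m []).length := hw _ hmem
    have hhead : ([0] ++ (List.range W).map (fun t =>
        ((List.range (W + 1)).map (fun j => pvS matrix m j)).getD (t + 1) 0
          + (0 + ((List.range (t + 1)).map (fun c => (matrix.getD m []).getD c 0)).sum)))
        = (List.range (W + 1)).map (fun j => pvS matrix (m + 1) j) := by
      rw [List.singleton_append, List.range_succ_eq_map, List.map_cons, List.map_map]
      refine congrArg₂ List.cons (by simp [pvS]) ?_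
      rw [List.map_map]
      apply List.map_congr_left
      intro t ht
      rw [List.mem_range] at ht
      rw [List.getD_cons_succ, PySem.List.getD_map_range _ _ _ _ ht]
      have h2 : ((List.range (t + 1)).map (fun c => (matrix.getD m []).getD c 0)).sum
          = ((matrix.getD m []).take (t + 1)).sum := by
        simpa using seg_sum (matrix.getD m []) 0 (t + 1) (by omega)
      simp only [Function.comp, h2, pvS_succ]
      ring
    rw [hhead]
    simp

-- difference of two pvS rows = sum of the rows between
theorem pvS_diff (matrix : List (List Int)) (w i n : Nat) :
    pvS matrix (i + n) w - pvS matrix i w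
      = ((List.range n).map (fun t => ((matrix.getD (i + t) []).take w).sum)).sum := by
  induction n with
  | zero => simp
  | succ n ih =>
    rw [show i + (n + 1) = (i + n) + 1 from rfl, pvS_succ, List.range_succ, List.map_append,
      List.sum_append]
    simp only [List.map_cons, List.map_nil, List.sum_cons, List.sum_nil]
    omega

theorem sum_map_sub {α : Type} (l : List α) (f g : α → Int) :
    (l.map (fun x => f x - g x)).sum = (l.map f).sum - (l.map g).sum := by
  induction l with
  | nil => simp
  | cons x xs ih => simp only [List.map_cons, List.sum_cons, ih]; ring

-- ===== VERDICT (by name: the statement is the Claim_ definition above) =====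
theorem sumOfSubsquares_spec : Claim_equal_sumOfSubsquares := by
  intro matrix k _ hpre
  unfold Spec_sumOfSubsquares sumOfSubsquares sumOfSubsquares_alt
  by_cases h0 : matrix = [] ∨ matrix.headD [] = []
  · rw [if_pos h0, if_pos h0]
  · rw [if_neg h0, if_neg h0]
    simp only [PySem.List.len_eq]
    by_cases hk : k > (matrix.length : Int) ∨ k > ((matrix.headD []).length : Int)
    · rw [if_pos hk, if_pos hk]
    · rw [if_neg hk, if_neg hk]
      push Not at hk
      have hk0 : 0 ≤ k := hpre.1.resolve_right h0
      have hw : ∀ row ∈ matrix, (matrix.headD []).length ≤ row.length :=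
        hpre.2 ⟨hk0, hk.1, hk.2⟩
      obtain ⟨n, rfl⟩ : ∃ m : Nat, k = (m : Int) := ⟨k.toNat, (Int.toNat_of_nonneg hk0).symm⟩
      have hnR : n ≤ matrix.length := by exact_mod_cast hk.1
      have hnW : n ≤ (matrix.headD []).length := by exact_mod_cast hk.2
      -- B's side: reduce the table-building fold to its characterisation
      rw [PySem.List.pyRepeat_singleton,
        show (((matrix.headD []).length : Int) + 1).toNat = (matrix.headD []).length + 1 from by
          omega]
      simp only [PySem.List.pyRange_zero_nat, List.foldl_map, PySem.List.pyGetD_natCast,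
        ← Nat.cast_add_one]
      rw [buildP matrix (matrix.headD []).length hw matrix.length le_rfl]
      rw [PySem.List.foldl_append_singleton_eq_map, List.nil_append]
      apply List.map_congr_left
      intro i hi
      rw [PySem.List.foldl_append_singleton_eq_map, List.nil_append]
      apply List.map_congr_left
      intro j hj
      rw [PySem.List.mem_pyRange_one] at hi hj
      obtain ⟨iN, rfl⟩ : ∃ m : Nat, i = (m : Int) := ⟨i.toNat, (Int.toNat_of_nonneg hi.1).symm⟩
      obtain ⟨jN, rfl⟩ : ∃ m : Nat, j = (m : Int) := ⟨j.toNat, (Int.toNat_of_nonneg hj.1).symm⟩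
      have hiN : iN + n ≤ matrix.length := by omega
      have hjN : jN + n ≤ (matrix.headD []).length := by omega
      -- B side: four table lookups become pvS values
      simp only [← Nat.cast_add, PySem.List.pyGetD_natCast]
      rw [PySem.List.getD_map_range _ _ _ _ (show iN + n < matrix.length + 1 by omega),
        PySem.List.getD_map_range _ _ _ _ (show iN < matrix.length + 1 by omega),
        PySem.List.getD_map_range _ _ _ _ (show jN + n < (matrix.headD []).length + 1 by omega),
        PySem.List.getD_map_range _ _ _ _ (show jN + n < (matrix.headD []).length + 1 by omega),
        PySem.List.getD_map_range _ _ _ _ (show jN < (matrix.headD []).length + 1 by omega),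
        PySem.List.getD_map_range _ _ _ _ (show jN < (matrix.headD []).length + 1 by omega)]
      -- A side: the r-loop over [i, i+k)
      rw [show PySem.List.pyRange (iN : Int) ((iN + n : Nat) : Int) 1
            = (List.range n).map (fun t : Nat => ((iN + t : Nat) : Int)) from by
          rw [PySem.List.pyRange_one, show (((iN + n : Nat) : Int) - (iN : Int)).toNat = n from by
            omega]
          apply List.map_congr_left; intro t _; push_cast; ring]
      rw [List.foldl_map]
      have hA : ∀ (init : Int) (t : Nat), t < n →
          (PySem.List.pyRange (jN : Int) ((jN + n : Nat) : Int) 1).foldl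
            (fun total c => total +
              PySem.List.pyGetD (PySem.List.pyGetD matrix ((iN + t : Nat) : Int) []) c 0) init
          = init + (((matrix.getD (iN + t) []).take (jN + n)).sum
              - ((matrix.getD (iN + t) []).take jN).sum) := by
        intro init t ht
        rw [PySem.List.foldl_add]
        congr 1
        rw [show PySem.List.pyRange (jN : Int) ((jN + n : Nat) : Int) 1
              = (List.range n).map (fun c : Nat => ((jN + c : Nat) : Int)) from by
            rw [PySem.List.pyRange_one, show (((jN + n : Nat) : Int) - (jN : Int)).toNat = n from by
              omega]
            apply List.map_congr_left; intro c _; push_cast; ring]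
        rw [List.map_map]
        have hmem : matrix.getD (iN + t) [] ∈ matrix := by
          rw [List.getD_eq_getElem matrix [] (by omega)]; exact List.getElem_mem _
        have hrowlen : jN + n ≤ (matrix.getD (iN + t) []).length := le_trans hjN (hw _ hmem)
        simp only [Function.comp_def, PySem.List.pyGetD_natCast]
        exact seg_sum _ jN n hrowlen
      rw [PySem.List.foldl_congr_mem _ _
        (fun x (t : Nat) => x + (((matrix.getD (iN + t) []).take (jN + n)).sum
          - ((matrix.getD (iN + t) []).take jN).sum)) _
        (fun acc t ht => hA acc t (List.mem_range.mp ht))]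
      rw [PySem.List.foldl_add, sum_map_sub, ← pvS_diff matrix (jN + n) iN n,
        ← pvS_diff matrix jN iN n]
      ring
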